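-- pv_equiv track=rewrite | github.com/pypi-data/pypi-mirror-322 | packages/blackfish/blackfish-0.2.8.tar.gz/blackfish-0.2.8/src/blackfish/parsing/roots.py | _iter_roots
-- ===== SOURCE A (Python) =====
-- from typing import Iterator
--
-- def _iter_roots(lines: list[str]) -> Iterator[list[str]]:
--     """Iterate over excited state root blocks in ORCA output text lines.
--
--     Args:
--         lines (list[str]): List of text lines from ORCA output file starting
--             with a STATE header line.
--
--     Yields:
--         list[str]: List of lines comprising a single excited state root block,
--             including the header line and orbital transition lines.
--
--     Each root block starts with "STATE" and contains one or more orbital transition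
--     lines. Blocks are delimited by empty lines and subsequent STATE headers.
--     """
--     current_state = []
--
--     for i, line in enumerate(lines):
--         line = line.strip()
--         if not line:
--             if i + 1 < len(lines) and lines[i + 1].strip().startswith("STATE"):
--                 continue
--             else:
--                 break
--
--         if line.startswith("STATE"):
--             if current_state:
--                 yield current_state
--             current_state = [line]
--         elif current_state:
--             current_state.append(line)
--
--     if current_state:  # Don't forget the last state
--         yield current_state
-- ===== SOURCE B (Python) =====
-- def _iter_roots(lines):
--     # Phase 1: find the cutoff (first empty line not followed by a STATE header).
--     n = len(lines)
--     cutoff = n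
--     for i, line in enumerate(lines):
--         if not line.strip():
--             if not (i + 1 < n and lines[i + 1].strip().startswith("STATE")):
--                 cutoff = i
--                 break
--     # Phase 2: strip, drop empties, then split by STATE headers.
--     kept = [s for s in (ln.strip() for ln in lines[:cutoff]) if s]
--     blocks = []
--     for s in kept:
--         if s.startswith("STATE"):
--             blocks.append([s])
--         elif blocks:
--             blocks[-1].append(s)
--     yield from blocks
-- ===== Notes on version B (the rewrite author's own statement) =====
-- stated objective: alternative
-- what changed: Replaces A's interleaved break/continue state machine with a two-phase decomposition: first locate the terminating blank line (cutoff), then strip/filter the prefix and split it into blocks at STATE headers via an append-to-last-block fold.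
import Mathlib
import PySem

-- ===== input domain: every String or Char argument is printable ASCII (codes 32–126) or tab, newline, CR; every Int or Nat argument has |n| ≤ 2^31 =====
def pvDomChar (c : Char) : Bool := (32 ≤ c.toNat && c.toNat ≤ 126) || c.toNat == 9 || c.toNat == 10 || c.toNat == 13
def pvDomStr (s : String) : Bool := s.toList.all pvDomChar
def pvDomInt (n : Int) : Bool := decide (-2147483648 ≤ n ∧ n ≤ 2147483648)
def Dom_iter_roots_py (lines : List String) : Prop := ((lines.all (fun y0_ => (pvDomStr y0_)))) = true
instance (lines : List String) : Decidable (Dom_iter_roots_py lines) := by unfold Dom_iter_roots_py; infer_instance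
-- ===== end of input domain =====

-- B replaces A's interleaved break/continue state machine with a locate-cutoff-then-strip/filter/split-by-header decomposition (same cost, different structure); A is a generator, equivalence is about the yielded sequence as a list.


-- ===== PORT A =====
-- yields collected in order; `flushA` is the `if current_state: yield current_state` step
def flushA (cur : List String) : List (List String) :=
  if cur ≠ [] then [cur] else []

-- the for-loop: `rest` is the remaining lines; the lookahead lines[i+1] is rest's head
def loopA (rest : List String) (cur : List String) : List (List String) :=
  match rest with
  | [] => flushA cur
  | l :: rest' =>
    let s := PySem.Str.strip l
    if s = "" then
      match rest'.head? with
      | some nxt =>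
        if PySem.Str.startswith (PySem.Str.strip nxt) "STATE" then loopA rest' cur
        else flushA cur                     -- break, then final flush
      | none => flushA cur
    else if PySem.Str.startswith s "STATE" then
      flushA cur ++ loopA rest' [s]
    else if cur ≠ [] then loopA rest' (cur ++ [s])
    else loopA rest' cur

def iter_roots_py (lines : List String) : List (List String) :=
  loopA lines []

-- ===== PORT B =====
-- phase 1: length of lines[:cutoff] (first blank line whose successor does not start with STATE)
def cutPrefixLen (rest : List String) : Nat :=
  match rest with
  | [] => 0
  | l :: rest' =>
    if PySem.Str.strip l = "" then
      match rest'.head? with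
      | some nxt =>
        if PySem.Str.startswith (PySem.Str.strip nxt) "STATE" then cutPrefixLen rest' + 1
        else 0
      | none => 0
    else cutPrefixLen rest' + 1

-- phase 2 step: a STATE header opens a new block, other lines extend the last block
def addLine (blocks : List (List String)) (s : String) : List (List String) :=
  if PySem.Str.startswith s "STATE" then blocks ++ [[s]]
  else
    match blocks.getLast? with
    | some last => blocks.dropLast ++ [last ++ [s]]
    | none => blocks

def iter_roots_py_alt (lines : List String) : List (List String) :=
  let kept := ((lines.take (cutPrefixLen lines)).map PySem.Str.strip).filter (· ≠ "")
  kept.foldl addLine []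

-- ===== PRECONDITION & SPEC =====
def Spec_iter_roots_py (lines : List String) (out : List (List String)) : Prop := out = iter_roots_py_alt lines
instance (lines : List String) (out : List (List String)) : Decidable (Spec_iter_roots_py lines out) := by unfold Spec_iter_roots_py; infer_instance

-- ===== CLAIM (what is proved, stated in full; the proofs are below) =====
def Claim_equal_iter_roots_py : Prop := ∀ (lines : List String), Dom_iter_roots_py lines → Spec_iter_roots_py lines (iter_roots_py lines)

-- ===== LEMMAS AND PROOFS =====

-- abstract middle form: process the stripped non-empty prefix with A's open-block semantics
def consume (ss : List String) (cur : List String) : List (List String) :=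
  match ss with
  | [] => flushA cur
  | s :: ss' =>
    if PySem.Str.startswith s "STATE" then flushA cur ++ consume ss' [s]
    else if cur ≠ [] then consume ss' (cur ++ [s])
    else consume ss' cur

def keptOf (rest : List String) : List String :=
  ((rest.take (cutPrefixLen rest)).map PySem.Str.strip).filter (· ≠ "")

theorem loopA_eq_consume (rest cur : List String) :
    loopA rest cur = consume (keptOf rest) cur := by
  induction rest generalizing cur with
  | nil => simp [loopA, keptOf, cutPrefixLen, consume]
  | cons l rest' ih =>
    by_cases hs : PySem.Str.strip l = ""
    · cases hh : rest'.head? with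
      | none =>
        simp [loopA, keptOf, cutPrefixLen, hs, hh, consume]
      | some nxt =>
        by_cases hst : PySem.Chars.startswith (PySem.Chars.strip nxt.toList) ['S','T','A','T','E'] = true
        · have h1 : loopA (l :: rest') cur = loopA rest' cur := by
            simp [loopA, hs, hh, hst]
          have h2 : keptOf (l :: rest') = keptOf rest' := by
            simp [keptOf, cutPrefixLen, hs, hh, hst]
          rw [h1, h2, ih]
        · simp only [Bool.not_eq_true] at hst
          simp [loopA, keptOf, cutPrefixLen, hs, hh, hst, consume]
    · have hk : keptOf (l :: rest') = PySem.Str.strip l :: keptOf rest' := by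
        simp [keptOf, cutPrefixLen, hs]
      rw [hk]
      by_cases hst : PySem.Chars.startswith (PySem.Chars.strip l.toList) ['S','T','A','T','E'] = true
      · simp [loopA, hs, hst, consume, ih]
      · simp only [Bool.not_eq_true] at hst
        by_cases hc : cur = []
        · simp [loopA, hs, hst, hc, consume, ih]
        · simp [loopA, hs, hst, hc, consume, ih]

theorem foldl_addLine_concat (ss : List String) (bs : List (List String)) (cur : List String)
    (hcur : cur ≠ []) :
    ss.foldl addLine (bs ++ [cur]) = bs ++ consume ss cur := by
  induction ss generalizing bs cur with
  | nil => simp [consume, flushA, hcur]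
  | cons s ss' ih =>
    by_cases hst : PySem.Chars.startswith s.toList ['S','T','A','T','E'] = true
    · have h1 : addLine (bs ++ [cur]) s = (bs ++ [cur]) ++ [[s]] := by simp [addLine, hst]
      rw [List.foldl_cons, h1, ih (bs ++ [cur]) [s] (by simp)]
      simp [consume, hst, flushA, hcur]
    · simp only [Bool.not_eq_true] at hst
      have h1 : addLine (bs ++ [cur]) s = bs ++ [cur ++ [s]] := by
        simp [addLine, hst]
      rw [List.foldl_cons, h1, ih bs (cur ++ [s]) (by simp)]
      simp [consume, hst, hcur]

theorem foldl_addLine_nil (ss : List String) :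
    List.foldl addLine [] ss = consume ss [] := by
  induction ss with
  | nil => simp [consume, flushA]
  | cons s ss' ih =>
    by_cases hst : PySem.Chars.startswith s.toList ['S','T','A','T','E'] = true
    · have h1 : addLine [] s = [[s]] := by simp [addLine, hst]
      rw [List.foldl_cons, h1,
          show ([[s]] : List (List String)) = [] ++ [[s]] by simp,
          foldl_addLine_concat ss' [] [s] (by simp)]
      simp [consume, hst, flushA]
    · simp only [Bool.not_eq_true] at hst
      have h1 : addLine [] s = [] := by simp [addLine, hst]
      simp [List.foldl_cons, h1, consume, hst, ih]

-- ===== VERDICT (by name: the statement is the Claim_ definition above) =====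
theorem iter_roots_py_spec : Claim_equal_iter_roots_py := by
  intro lines _
  unfold Spec_iter_roots_py iter_roots_py iter_roots_py_alt
  rw [loopA_eq_consume lines []]
  exact (foldl_addLine_nil (keptOf lines)).symm
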